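-- pv_equiv track=rewrite | github.com/Matan-Hodadov/economic-algo | task4/main.py | create_all_divisions_after_pruning
-- ===== SOURCE A (Python) =====
-- from typing import List
--
-- def create_all_divisions_after_pruning(table: List) -> List:
--     possible_divisions = [[0]*len(table)]
--     for i in range(len(table[0])):
--         column = [row[i] for row in table]
--         new_divisions = []
--         for previously_division in possible_divisions:
--             for j in range(len(column)):
--                 temp = previously_division.copy()
--                 temp[j] += column[j]
--                 if temp not in new_divisions:
--                     new_divisions.append(temp)
--         possible_divisions = new_divisions
--     return possible_divisions
-- ===== SOURCE B (Python) =====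
-- from typing import List
-- import itertools
--
-- def create_all_divisions_after_pruning(table: List) -> List:
--     n = len(table)
--     m = len(table[0])
--     cols = [[row[i] for row in table] for i in range(m)]
--     out = []
--     seen = set()
--     for assignment in itertools.product(range(n), repeat=m):
--         v = [0] * n
--         for i, j in enumerate(assignment):
--             v[j] += cols[i][j]
--         t = tuple(v)
--         if t not in seen:
--             seen.add(t)
--             out.append(v)
--     return out
-- ===== Notes on version B (the rewrite author's own statement) =====
-- stated objective: alternative
-- what changed: A builds divisions column by column, deduplicating a frontier list at every column; B precomputes the columns, directly enumerates every row-choice tuple with itertools.product and deduplicates the resulting vectors once, first-seen, with a set.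
import Mathlib
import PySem

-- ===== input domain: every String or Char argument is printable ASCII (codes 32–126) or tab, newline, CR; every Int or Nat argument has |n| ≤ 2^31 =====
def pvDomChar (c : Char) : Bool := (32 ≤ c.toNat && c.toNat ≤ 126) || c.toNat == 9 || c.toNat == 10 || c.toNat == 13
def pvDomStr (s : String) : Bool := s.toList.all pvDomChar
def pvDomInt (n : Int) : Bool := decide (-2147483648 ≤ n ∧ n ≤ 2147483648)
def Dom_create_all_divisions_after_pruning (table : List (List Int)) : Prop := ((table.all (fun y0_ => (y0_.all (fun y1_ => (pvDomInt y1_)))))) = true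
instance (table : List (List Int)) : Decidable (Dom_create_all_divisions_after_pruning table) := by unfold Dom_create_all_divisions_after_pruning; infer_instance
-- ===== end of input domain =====

-- B replaces A's pruned column-by-column frontier build with a direct enumeration of all
-- row-choice combinations (itertools.product) deduplicated first-seen; objective: alternative
-- (a genuinely different algorithm, not faster).

-- ===== PORT A =====
-- column i of the table: [row[i] for row in table]; i comes from range(len(table[0])), so it is
-- nonneg and, under Pre_, in range for every row: `row.getD i 0` is exact for Python's row[i] there
def pvAcol (table : List (List Int)) (i : Nat) : List Int :=
  table.map (fun row => row.getD i 0)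

-- j comes from range(len(column)) so `.set j` / `.getD j 0` are exact for temp[j] += column[j]
def create_all_divisions_after_pruning (table : List (List Int)) : List (List Int) :=
  (List.range (table.headD []).length).foldl
    (fun possible_divisions i =>
      possible_divisions.foldl
        (fun new_divisions previously_division =>
          (List.range (pvAcol table i).length).foldl
            (fun new_divisions j =>
              if previously_division.set j
                  (previously_division.getD j 0 + (pvAcol table i).getD j 0) ∈ new_divisions
              then new_divisions
              else new_divisions ++
                [previously_division.set j
                  (previously_division.getD j 0 + (pvAcol table i).getD j 0)])
            new_divisions)
        [])
    [List.replicate table.length 0]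

-- ===== PORT B =====
-- port of Python's enumerate(); indices are nonneg so Nat is exact
def pvEnum {α : Type} (s : Nat) : List α → List (Nat × α)
  | [] => []
  | x :: t => (s, x) :: pvEnum (s + 1) t

-- itertools.product(range(n), repeat=m), lexicographic (last position varies fastest)
def pvProd (n : Nat) : Nat → List (List Nat)
  | 0 => [[]]
  | m + 1 => (pvProd n m).flatMap (fun a => (List.range n).map (fun j => a ++ [j]))

-- the inner per-assignment loop of Source B: v = [0]*n; for i, j in enumerate(a): v[j] += cols[i][j]
def pvVec (cols : List (List Int)) (n : Nat) (a : List Nat) : List Int :=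
  (pvEnum 0 a).foldl
    (fun v ij => v.set ij.2 (v.getD ij.2 0 + (cols.getD ij.1 []).getD ij.2 0))
    (List.replicate n 0)

-- cols = [[row[i] for row in table] for i in range(m)]; seen is Source B's `seen` set, st.1 its `out`
def create_all_divisions_after_pruning_alt (table : List (List Int)) : List (List Int) :=
  ((pvProd table.length (table.headD []).length).foldl
    (fun st a =>
      if pvVec ((List.range (table.headD []).length).map (pvAcol table)) table.length a ∈ st.2
      then st
      else (st.1 ++ [pvVec ((List.range (table.headD []).length).map (pvAcol table)) table.length a],
            PySem.Set.add st.2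
              (pvVec ((List.range (table.headD []).length).map (pvAcol table)) table.length a)))
    (([], PySem.Set.empty) : List (List Int) × PySem.Set (List Int))).1

-- ===== PRECONDITION & SPEC =====
-- Pre_ excludes exactly the inputs where Python A raises IndexError: the empty table
-- (table[0]) and tables with a row shorter than the first row (row[i]).
def Pre_create_all_divisions_after_pruning (table : List (List Int)) : Prop :=
  table ≠ [] ∧ ∀ row ∈ table, (table.headD []).length ≤ row.length
instance (table : List (List Int)) : Decidable (Pre_create_all_divisions_after_pruning table) := by
  unfold Pre_create_all_divisions_after_pruning; infer_instance

def pvWitness_create_all_divisions_after_pruning : List (List Int) := [[1, 2], [3, 4]]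

def Spec_create_all_divisions_after_pruning (table : List (List Int)) (out : List (List Int)) : Prop := out = create_all_divisions_after_pruning_alt table
instance (table : List (List Int)) (out : List (List Int)) : Decidable (Spec_create_all_divisions_after_pruning table out) := by unfold Spec_create_all_divisions_after_pruning; infer_instance

-- ===== CLAIM (what is proved, stated in full; the proofs are below) =====
def Claim_equal_create_all_divisions_after_pruning : Prop := ∀ (table : List (List Int)), Dom_create_all_divisions_after_pruning table → Pre_create_all_divisions_after_pruning table → Spec_create_all_divisions_after_pruning table (create_all_divisions_after_pruning table)

-- ===== LEMMAS AND PROOFS =====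

-- first-occurrence dedup of l relative to already-seen S
def pvFd {α : Type} [BEq α] [LawfulBEq α] (S : List α) : List α → List α
  | [] => []
  | a :: t => if a ∈ S then pvFd S t else a :: pvFd (S ++ [a]) t

theorem foldl_dedup {α : Type} [BEq α] [LawfulBEq α] (l : List α) :
    ∀ S : List α,
      l.foldl (fun acc a => if a ∈ acc then acc else acc ++ [a]) S = S ++ pvFd S l := by
  induction l with
  | nil => intro S; simp [pvFd]
  | cons a t ih =>
    intro S
    by_cases h : a ∈ S
    · simp [pvFd, h, List.foldl_cons, ih]
    · simp [pvFd, h, List.foldl_cons, ih, List.append_assoc]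

theorem pvFd_append {α : Type} [BEq α] [LawfulBEq α] (u : List α) :
    ∀ (S v : List α), pvFd S (u ++ v) = pvFd S u ++ pvFd (S ++ pvFd S u) v := by
  induction u with
  | nil => intro S v; simp [pvFd]
  | cons a t ih =>
    intro S v
    by_cases h : a ∈ S
    · simp [pvFd, h, ih]
    · simp [pvFd, h, ih, List.append_assoc]

theorem pvFd_of_subset {α : Type} [BEq α] [LawfulBEq α] (b : List α) :
    ∀ S : List α, (∀ y ∈ b, y ∈ S) → pvFd S b = [] := by
  induction b with
  | nil => intro S _; rfl
  | cons a t ih =>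
    intro S h
    have ha : a ∈ S := h a (by simp)
    simp only [pvFd, ha, if_pos]
    exact ih S (fun y hy => h y (by simp [hy]))

theorem mem_or_mem_pvFd {α : Type} [BEq α] [LawfulBEq α] (b : List α) :
    ∀ (S : List α) (y : α), y ∈ b → y ∈ S ∨ y ∈ pvFd S b := by
  induction b with
  | nil => intro S y hy; cases hy
  | cons a t ih =>
    intro S y hy
    by_cases h : a ∈ S
    · rcases List.mem_cons.mp hy with h1 | h1
      · subst h1; exact Or.inl h
      · simpa [pvFd, h] using ih S y h1
    · rcases List.mem_cons.mp hy with h1 | h1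
      · subst h1
        refine Or.inr ?_
        simp [pvFd, h]
      · rcases ih (S ++ [a]) y h1 with h2 | h2
        · rcases List.mem_append.mp h2 with h3 | h3
          · exact Or.inl h3
          · refine Or.inr ?_
            simp only [pvFd, h, if_neg, not_false_iff, List.mem_cons]
            exact Or.inl (by simpa using h3)
        · refine Or.inr ?_
          simp only [pvFd, h, if_neg, not_false_iff, List.mem_cons]
          exact Or.inr h2

-- key pruning lemma: deduplicating the frontier before expanding does not change the
-- first-seen dedup of the expansion
theorem pvFd_pruned {α : Type} [BEq α] [LawfulBEq α] (g : α → List α) (L : List α) :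
    ∀ (S0 S : List α), (∀ x ∈ S0, ∀ y ∈ g x, y ∈ S) →
      pvFd S ((pvFd S0 L).flatMap g) = pvFd S (L.flatMap g) := by
  induction L with
  | nil => intro S0 S _; simp [pvFd]
  | cons a t ih =>
    intro S0 S h
    by_cases ha : a ∈ S0
    · have hsub : ∀ y ∈ g a, y ∈ S := h a ha
      have hdrop : pvFd S (g a ++ t.flatMap g) = pvFd S (t.flatMap g) := by
        rw [pvFd_append, pvFd_of_subset (g a) S hsub]
        simp
      simp only [pvFd, ha, if_pos, List.flatMap_cons]
      rw [hdrop, ih S0 S h]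
    · simp only [pvFd, ha, if_neg, not_false_iff, List.flatMap_cons]
      rw [pvFd_append, pvFd_append]
      congr 1
      exact ih (S0 ++ [a]) (S ++ pvFd S (g a)) (by
        intro x hx y hy
        rcases List.mem_append.mp hx with h1 | h1
        · exact List.mem_append.mpr (Or.inl (h x h1 y hy))
        · have hxa : x = a := by simpa using h1
          subst hxa
          rcases mem_or_mem_pvFd (g x) S y hy with h2 | h2
          · exact List.mem_append.mpr (Or.inl h2)
          · exact List.mem_append.mpr (Or.inr h2))

theorem foldl_extend_dedup {α : Type} [BEq α] [LawfulBEq α] (ext : α → List α) (P : List α) :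
    ∀ acc : List α,
      P.foldl (fun nd p => nd ++ pvFd nd (ext p)) acc = acc ++ pvFd acc (P.flatMap ext) := by
  induction P with
  | nil => intro acc; simp [pvFd]
  | cons p t ih =>
    intro acc
    simp only [List.foldl_cons, List.flatMap_cons]
    rw [ih, pvFd_append, List.append_assoc]

-- ----- A-side reshaping -----

def pvAext (column : List Int) (prev : List Int) : List (List Int) :=
  (List.range column.length).map
    (fun j => prev.set j (prev.getD j 0 + column.getD j 0))

theorem Astep_eq (table : List (List Int)) (i : Nat) (s : List (List Int)) :
    (s.foldl
      (fun new_divisions previously_division =>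
        (List.range (pvAcol table i).length).foldl
          (fun new_divisions j =>
            if previously_division.set j
                (previously_division.getD j 0 + (pvAcol table i).getD j 0) ∈ new_divisions
            then new_divisions
            else new_divisions ++
              [previously_division.set j
                (previously_division.getD j 0 + (pvAcol table i).getD j 0)])
          new_divisions)
      []) = pvFd [] (s.flatMap (pvAext (pvAcol table i))) := by
  have hinner : ∀ (prev : List Int) (nd : List (List Int)),
      (List.range (pvAcol table i).length).foldl
        (fun new_divisions j =>
          if prev.set j (prev.getD j 0 + (pvAcol table i).getD j 0) ∈ new_divisions
          then new_divisions
          else new_divisions ++ [prev.set j (prev.getD j 0 + (pvAcol table i).getD j 0)])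
        nd = nd ++ pvFd nd (pvAext (pvAcol table i) prev) := by
    intro prev nd
    have hfd := foldl_dedup
      ((List.range (pvAcol table i).length).map
        (fun j => prev.set j (prev.getD j 0 + (pvAcol table i).getD j 0))) nd
    rw [List.foldl_map] at hfd
    rw [pvAext]
    exact hfd
  have houter : (fun (nd : List (List Int)) (p : List Int) =>
      (List.range (pvAcol table i).length).foldl
        (fun new_divisions j =>
          if p.set j (p.getD j 0 + (pvAcol table i).getD j 0) ∈ new_divisions
          then new_divisions
          else new_divisions ++ [p.set j (p.getD j 0 + (pvAcol table i).getD j 0)])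
        nd) = (fun nd p => nd ++ pvFd nd (pvAext (pvAcol table i) p)) :=
    funext fun nd => funext fun p => hinner p nd
  rw [houter, foldl_extend_dedup]
  simp

-- ----- B-side reshaping -----

theorem pvEnum_append_single {α : Type} (u : List α) :
    ∀ (s : Nat) (x : α), pvEnum s (u ++ [x]) = pvEnum s u ++ [(s + u.length, x)] := by
  induction u with
  | nil => intro s x; simp [pvEnum]
  | cons a t ih =>
    intro s x
    simp [pvEnum, ih]
    omega

theorem pvVec_append (cols : List (List Int)) (n : Nat) (a : List Nat) (j : Nat) :
    pvVec cols n (a ++ [j]) =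
      (pvVec cols n a).set j
        ((pvVec cols n a).getD j 0 + (cols.getD a.length []).getD j 0) := by
  unfold pvVec
  rw [pvEnum_append_single, List.foldl_append]
  simp

theorem pvProd_length (n : Nat) : ∀ (k : Nat) (a : List Nat), a ∈ pvProd n k → a.length = k := by
  intro k
  induction k with
  | zero => intro a ha; simp [pvProd] at ha; simp [ha]
  | succ m ih =>
    intro a ha
    simp only [pvProd, List.mem_flatMap, List.mem_map] at ha
    obtain ⟨b, hb, j, _, rfl⟩ := ha
    simp [ih b hb]

theorem flatMap_congr_mem {α β : Type} (l : List α) (f g : α → List β)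
    (h : ∀ a ∈ l, f a = g a) : l.flatMap f = l.flatMap g := by
  induction l with
  | nil => rfl
  | cons a t ih =>
    simp only [List.flatMap_cons]
    rw [h a (by simp), ih (fun a ha => h a (by simp [ha]))]

theorem Bfold_eq (cols : List (List Int)) (n : Nat) (l : List (List Nat)) :
    ∀ out : List (List Int),
      (l.foldl
        (fun st a =>
          if pvVec cols n a ∈ st.2 then st
          else (st.1 ++ [pvVec cols n a], PySem.Set.add st.2 (pvVec cols n a)))
        ((out, out) : List (List Int) × PySem.Set (List Int))) =
      (out ++ pvFd out (l.map (pvVec cols n)), out ++ pvFd out (l.map (pvVec cols n))) := by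
  induction l with
  | nil => intro out; simp [pvFd]
  | cons a t ih =>
    intro out
    by_cases h : pvVec cols n a ∈ out
    · simp only [List.foldl_cons, List.map_cons, pvFd, h, if_pos]
      exact ih out
    · have hadd : PySem.Set.add (out : PySem.Set (List Int)) (pvVec cols n a) = out ++ [pvVec cols n a] := by
        simp [PySem.Set.add, PySem.Set.contains, h]
      simp only [List.foldl_cons, List.map_cons, pvFd, h, if_neg, not_false_iff, hadd]
      rw [ih (out ++ [pvVec cols n a])]
      simp [List.append_assoc]

-- ----- main induction -----

theorem cols_getD (table : List (List Int)) (m i : Nat) (h : i < m) :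
    ((List.range m).map (pvAcol table)).getD i [] = pvAcol table i := by
  rw [List.getD_eq_getElem?_getD, List.getElem?_map, List.getElem?_range h]
  rfl

theorem main_invariant (table : List (List Int)) (m : Nat) :
    ∀ k, k ≤ m →
      (List.range k).foldl
        (fun possible i => pvFd [] (possible.flatMap (pvAext (pvAcol table i))))
        [List.replicate table.length 0] =
      pvFd []
        ((pvProd table.length k).map
          (pvVec ((List.range m).map (pvAcol table)) table.length)) := by
  intro k
  induction k with
  | zero =>
    intro _
    simp [pvProd, pvVec, pvEnum, pvFd]
  | succ k ih =>
    intro hk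
    have hkm : k < m := hk
    rw [List.range_succ, List.foldl_append, List.foldl_cons, List.foldl_nil,
      ih (Nat.le_of_lt hkm)]
    rw [pvFd_pruned _ _ [] [] (by intro x hx; cases hx)]
    congr 1
    have hlen : ∀ a ∈ pvProd table.length k, a.length = k := pvProd_length _ k
    rw [pvProd, List.map_flatMap, List.flatMap_map]
    apply flatMap_congr_mem
    intro a ha
    rw [List.map_map]
    unfold pvAext
    rw [show (pvAcol table k).length = table.length by simp [pvAcol]]
    apply List.map_congr_left
    intro j _
    simp only [Function.comp]
    rw [pvVec_append, hlen a ha, cols_getD table m k hkm]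

-- ===== VERDICT (by name: the statement is the Claim_ definition above) =====
theorem create_all_divisions_after_pruning_spec : Claim_equal_create_all_divisions_after_pruning := by
  intro table _ _
  unfold Spec_create_all_divisions_after_pruning
  unfold create_all_divisions_after_pruning create_all_divisions_after_pruning_alt
  rw [show (([], PySem.Set.empty) : List (List Int) × PySem.Set (List Int)) =
    (([], []) : List (List Int) × PySem.Set (List Int)) from rfl]
  rw [Bfold_eq]
  rw [show (fun (possible_divisions : List (List Int)) (i : Nat) =>
      possible_divisions.foldl
        (fun new_divisions previously_division =>
          (List.range (pvAcol table i).length).foldl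
            (fun new_divisions j =>
              if previously_division.set j
                  (previously_division.getD j 0 + (pvAcol table i).getD j 0) ∈ new_divisions
              then new_divisions
              else new_divisions ++
                [previously_division.set j
                  (previously_division.getD j 0 + (pvAcol table i).getD j 0)])
            new_divisions)
        []) = (fun possible i => pvFd [] (possible.flatMap (pvAext (pvAcol table i)))) from
    funext fun s => funext fun i => Astep_eq table i s]
  rw [main_invariant table (table.headD []).length (table.headD []).length (Nat.le_refl _)]
  simp
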